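-- pv_equiv track=rewrite | github.com/pypi-data/pypi-mirror-40 | packages/polarion-docstrings/polarion-docstrings-0.13.tar.gz/polarion-docstrings-0.13/polarion_docstrings/parser.py | lines_to_list
-- ===== SOURCE A (Python) =====
-- from collections import namedtuple
--
-- DocstringsRecord = namedtuple("DocstringsRecord", "lineno column value")
--
-- def lines_to_list(lines, start=0, lineno_offset=0, stop=None):
--     """Creates list out of docstring lines.
--
--     Includes column and line number info for each line.
--     """
--     if stop:
--         lines = lines[start:stop]
--     else:
--         lines = lines[start:]
--
--     lines_list = []
--     indent = len(lines[0]) - len(lines[0].lstrip(" "))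
--     for num, line in enumerate(lines, 1):
--         line_stripped = line.strip()
--         if not line_stripped:
--             continue
--         curr_indent = len(line) - len(line.lstrip(" "))
--         if curr_indent < indent:
--             break
--
--         # check if the line should be appended to previous key
--         first_word = line_stripped.split(" ")[0] or line_stripped
--         if curr_indent > indent and first_word[-1] != ":":
--             prev_lineno, prev_indent, prev_value = lines_list.pop()
--             lines_list.append(
--                 DocstringsRecord(
--                     prev_lineno, prev_indent, "{} {}".format(prev_value, line_stripped)
--                 )
--             )
--             continue
--
--         if curr_indent > indent:
--             continue
--         lines_list.append(DocstringsRecord(num + lineno_offset, indent, line_stripped))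
--
--     return lines_list
-- ===== SOURCE B (Python) =====
-- from collections import namedtuple
--
-- DocstringsRecord = namedtuple("DocstringsRecord", "lineno column value")
--
--
-- def lines_to_list(lines, start=0, lineno_offset=0, stop=None):
--     """Creates list out of docstring lines (single pending-record pass, no pop)."""
--     if stop:
--         lines = lines[start:stop]
--     else:
--         lines = lines[start:]
--
--     base = len(lines[0]) - len(lines[0].lstrip(" "))
--     result = []
--     pending = None  # (lineno, [value chunks]) of the record being assembled
--     for num, line in enumerate(lines, 1):
--         stripped = line.strip()
--         if not stripped:
--             continue
--         curr_indent = len(line) - len(line.lstrip(" "))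
--         if curr_indent < base:
--             break
--         if curr_indent == base:
--             if pending is not None:
--                 result.append(DocstringsRecord(pending[0], base, " ".join(pending[1])))
--             pending = (num + lineno_offset, [stripped])
--         elif not (stripped.split(" ")[0] or stripped).endswith(":"):
--             pending[1].append(stripped)
--         # deeper line whose first word ends in ':' is dropped
--     if pending is not None:
--         result.append(DocstringsRecord(pending[0], base, " ".join(pending[1])))
--     return result
-- ===== Notes on version B (the rewrite author's own statement) =====
-- stated objective: alternative
-- what changed: B replaces A's pop-reappend merging of the last record by maintaining a single pending record whose value chunks are collected in a list and joined once with ' '.join when the record is flushed, so continuation lines never reformat the accumulated value.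
-- outside the precondition, e.g. on lines_to_list([], 0, 0, None): A raises IndexError, B raises IndexError; on lines_to_list(['  ', '    b'], 0, 0, None): A raises IndexError, B raises TypeError
import Mathlib
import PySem

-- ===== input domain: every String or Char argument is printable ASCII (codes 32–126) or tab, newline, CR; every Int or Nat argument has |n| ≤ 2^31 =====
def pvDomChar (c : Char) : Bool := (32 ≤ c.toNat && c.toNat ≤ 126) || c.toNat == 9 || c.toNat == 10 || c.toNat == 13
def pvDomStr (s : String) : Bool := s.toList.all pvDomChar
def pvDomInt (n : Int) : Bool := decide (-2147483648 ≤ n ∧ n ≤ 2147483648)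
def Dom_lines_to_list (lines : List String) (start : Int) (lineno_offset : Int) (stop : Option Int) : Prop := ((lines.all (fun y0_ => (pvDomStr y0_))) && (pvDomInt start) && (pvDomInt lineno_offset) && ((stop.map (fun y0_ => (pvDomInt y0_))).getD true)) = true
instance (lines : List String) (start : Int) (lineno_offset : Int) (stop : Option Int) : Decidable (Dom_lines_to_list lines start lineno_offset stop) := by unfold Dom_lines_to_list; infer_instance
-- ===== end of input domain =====

-- B replaces A's pop-and-reformat merging by a single pending record whose value
-- chunks are joined once when the record is flushed (alternative decomposition).

-- shared helpers: expressions both Python versions contain verbatim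
-- len(line) - len(line.lstrip(" ")): exact, lstrip(" ") removes exactly the leading ' ' run
def pyIndent (line : String) : Int := ((line.toList.takeWhile (fun c => c == ' ')).length : Int)

-- `lines[start:stop] if stop else lines[start:]` (stop truthy = some non-zero)
def pySegment (lines : List String) (start : Int) (stop : Option Int) : List String :=
  match stop with
  | some v => if v ≠ 0 then PySem.List.slice lines (some start) (some v)
              else PySem.List.slice lines (some start) none
  | none => PySem.List.slice lines (some start) none

-- ===== PORT A =====
def linesToListLoopA (base off : Int) : List String → Int → List (Int × Int × String) → List (Int × Int × String)
  | [], _, acc => acc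
  | line :: rest, num, acc =>
    let s := PySem.Str.strip line
    if s = "" then linesToListLoopA base off rest (num + 1) acc
    else
      let ci := pyIndent line
      if ci < base then acc
      else
        let fw0 := ((PySem.Str.split? s " ").getD []).headD ""   -- line_stripped.split(" ")[0] (sep ≠ "" so split? = some)
        let fw := if fw0 = "" then s else fw0            -- … or line_stripped
        if ci > base ∧ PySem.Str.pyGet? fw (-1) ≠ some ':' then
          match acc.getLast? with
          | some (pl, pi, pv) =>
              linesToListLoopA base off rest (num + 1)
                (acc.dropLast ++ [(pl, pi, PySem.Str.join " " [pv, s])])  -- "{} {}".format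
          | none => linesToListLoopA base off rest (num + 1) acc  -- Python: IndexError (pop from []); excluded by Pre_
        else if ci > base then linesToListLoopA base off rest (num + 1) acc
        else linesToListLoopA base off rest (num + 1) (acc ++ [(num + off, base, s)])

def lines_to_list (lines : List String) (start : Int) (lineno_offset : Int) (stop : Option Int) : List (Int × Int × String) :=
  let seg := pySegment lines start stop
  match seg with
  | [] => []  -- Python: IndexError on lines[0]; excluded by Pre_
  | l0 :: _ => linesToListLoopA (pyIndent l0) lineno_offset seg 1 []

-- ===== PORT B =====
-- `(stripped.split(" ")[0] or stripped).endswith(":")` is false (line merges up)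
def mergesUp (s : String) : Bool :=
  let fw0 := ((PySem.Str.split? s " ").getD []).headD ""
  let fw := if fw0 = "" then s else fw0
  ! PySem.Str.endswith fw ":"

-- flush the pending record: DocstringsRecord(pending[0], base, " ".join(pending[1]))
def flushPending (base : Int) : Option (Int × List String) → List (Int × Int × String)
  | none => []
  | some (ln, parts) => [(ln, base, PySem.Str.join " " parts)]

def linesToListLoopB (base off : Int) : List String → Int → List (Int × Int × String) → Option (Int × List String) → List (Int × Int × String)
  | [], _, res, p => res ++ flushPending base p
  | line :: rest, num, res, p =>
    let s := PySem.Str.strip line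
    if s = "" then linesToListLoopB base off rest (num + 1) res p
    else
      let ci := pyIndent line
      if ci < base then res ++ flushPending base p   -- break, then the final flush
      else if ci = base then
        linesToListLoopB base off rest (num + 1) (res ++ flushPending base p) (some (num + off, [s]))
      else if mergesUp s then
        match p with
        | some (ln, parts) => linesToListLoopB base off rest (num + 1) res (some (ln, parts ++ [s]))
        | none => linesToListLoopB base off rest (num + 1) res none  -- Python: TypeError (pending is None); excluded by Pre_
      else linesToListLoopB base off rest (num + 1) res p

def lines_to_list_alt (lines : List String) (start : Int) (lineno_offset : Int) (stop : Option Int) : List (Int × Int × String) :=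
  let seg := pySegment lines start stop
  match seg with
  | [] => []  -- Python: IndexError; excluded by Pre_
  | l0 :: _ => linesToListLoopB (pyIndent l0) lineno_offset seg 1 [] none

-- ===== PRECONDITION & SPEC =====
-- Pre_ excludes exactly the inputs where A raises: an empty slice (IndexError on lines[0]),
-- and a deeper non-':' line appearing before any base-indent record (pop from empty list).
def Pre_lines_to_list (lines : List String) (start : Int) (lineno_offset : Int) (stop : Option Int) : Prop :=
  let seg := pySegment lines start stop
  let base := pyIndent (seg.headD "")
  seg ≠ [] ∧
  ∀ i < seg.length,
    (PySem.Str.strip (seg.getD i "") ≠ "" ∧ base < pyIndent (seg.getD i "") ∧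
     mergesUp (PySem.Str.strip (seg.getD i "")) = true ∧
     (∀ j < i, PySem.Str.strip (seg.getD j "") ≠ "" → base ≤ pyIndent (seg.getD j ""))) →
    ∃ j < i, PySem.Str.strip (seg.getD j "") ≠ "" ∧ pyIndent (seg.getD j "") = base
instance (lines : List String) (start : Int) (lineno_offset : Int) (stop : Option Int) : Decidable (Pre_lines_to_list lines start lineno_offset stop) := by unfold Pre_lines_to_list; infer_instance

def pvWitness_lines_to_list : List String × Int × Int × Option Int :=
  (["  foo:", "    deep: skipped", "  bar baz", "", "    more words", " out"], 0, 0, none)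

def Spec_lines_to_list (lines : List String) (start : Int) (lineno_offset : Int) (stop : Option Int) (out : List (Int × Int × String)) : Prop := out = lines_to_list_alt lines start lineno_offset stop
instance (lines : List String) (start : Int) (lineno_offset : Int) (stop : Option Int) (out : List (Int × Int × String)) : Decidable (Spec_lines_to_list lines start lineno_offset stop out) := by unfold Spec_lines_to_list; infer_instance

-- ===== CLAIM (what is proved, stated in full; the proofs are below) =====
def Claim_equal_lines_to_list : Prop := ∀ (lines : List String) (start : Int) (lineno_offset : Int) (stop : Option Int), Dom_lines_to_list lines start lineno_offset stop → Pre_lines_to_list lines start lineno_offset stop → Spec_lines_to_list lines start lineno_offset stop (lines_to_list lines start lineno_offset stop)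

-- ===== LEMMAS AND PROOFS =====


-- " ".join([s]) = s
lemma join_singleton_str (sep s : String) : PySem.Str.join sep [s] = s := by
  apply String.toList_inj.mp
  simp [PySem.Str.toList_join, PySem.Chars.join_singleton]

-- sep.join on the Chars side distributes over a one-element extension
lemma chars_join_snoc (sep : List Char) (ps : List (List Char)) (s : List Char) (h : ps ≠ []) :
    PySem.Chars.join sep (ps ++ [s]) = PySem.Chars.join sep ps ++ sep ++ s := by
  induction ps with
  | nil => exact absurd rfl h
  | cons a ps ih =>
    cases ps with
    | nil => simp [PySem.Chars.join_cons_cons, PySem.Chars.join_singleton]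
    | cons b t =>
      simp only [List.cons_append, PySem.Chars.join_cons_cons]
      rw [show (b :: t) ++ [s] = b :: (t ++ [s]) from rfl] at ih
      rw [ih (by simp)]
      simp [List.append_assoc]

-- " ".join(parts + [s]) extends " ".join(parts) by one chunk (parts nonempty)
lemma join_snoc (parts : List String) (s : String) (h : parts ≠ []) :
    PySem.Str.join " " (parts ++ [s]) = PySem.Str.join " " [PySem.Str.join " " parts, s] := by
  apply String.toList_inj.mp
  simp only [PySem.Str.toList_join, List.map_append, List.map_cons, List.map_nil]
  rw [chars_join_snoc _ _ _ (by simpa using h)]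
  rw [PySem.Chars.join_cons_cons, PySem.Chars.join_singleton]

-- fw[-1] != ':'  <->  not fw.endswith(":")  (fw nonempty)
lemma last_ne_colon_iff (fw : String) (h : fw ≠ "") :
    (PySem.Str.pyGet? fw (-1) ≠ some ':') ↔ (! PySem.Str.endswith fw ":") = true := by
  have hl : fw.toList ≠ [] := by
    intro hc; exact h (String.toList_inj.mp (by simp [hc]))
  rcases List.eq_nil_or_concat fw.toList with hc | ⟨ys, y, hys⟩
  · exact absurd hc hl
  rw [List.concat_eq_append] at hys
  have h1 : PySem.Str.pyGet? fw (-1) = some y := by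
    simp [hys, PySem.List.pyGet?_neg_one_append_singleton]
  have h2 : PySem.Str.endswith fw ":" = true ↔ y = ':' := by
    rw [show PySem.Str.endswith fw ":" = PySem.Chars.endswith fw.toList ":".toList from by
          simp]
    rw [PySem.Chars.endswith_iff, hys]
    show [':'] <:+ ys ++ [y] ↔ y = ':'
    constructor
    · rintro ⟨t, ht⟩
      have := congrArg List.getLast? ht
      simpa [eq_comm] using this
    · rintro rfl; exact ⟨ys, rfl⟩
  rw [h1]
  constructor
  · intro hne
    simp only [Bool.not_eq_true'] at *
    by_contra hb
    simp only [Bool.not_eq_false] at hb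
    exact hne (by rw [h2.mp hb])
  · intro hb hcontra
    have hy : y = ':' := by injection hcontra
    have ht := h2.mpr hy
    simp_all

-- loop correspondence: A's accumulator is B's result plus the flushed pending record
lemma loop_eq (base off : Int) (xs : List String) : ∀ (num : Int) (res : List (Int × Int × String)) (p : Option (Int × List String)),
    (∀ ln parts, p = some (ln, parts) → parts ≠ []) →
    (p = none → res = []) →
    linesToListLoopA base off xs num (res ++ flushPending base p) =
      linesToListLoopB base off xs num res p := by
  induction xs with
  | nil => intro num res p hp hn; simp [linesToListLoopA, linesToListLoopB]
  | cons line rest ih =>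
    intro num res p hp hn
    by_cases hs : PySem.Str.strip line = ""
    · simp only [linesToListLoopA, linesToListLoopB, hs, if_true]
      exact ih (num + 1) res p hp hn
    · by_cases hlt : pyIndent line < base
      · simp [linesToListLoopA, linesToListLoopB, hs, hlt]
      · simp only [linesToListLoopA, linesToListLoopB, hs, hlt, if_false]
        set s := PySem.Str.strip line with hsdef
        set fw0 := ((PySem.Str.split? s " ").getD []).headD "" with hfw0
        set fw := if fw0 = "" then s else fw0 with hfw
        have hfwne : fw ≠ "" := by
          rw [hfw]; split_ifs with h0
          · exact hs
          · exact h0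
        have hcolon : (PySem.Str.pyGet? fw (-1) ≠ some ':') ↔ mergesUp s = true := by
          show _ ↔ (! PySem.Str.endswith fw ":") = true
          exact last_ne_colon_iff fw hfwne
        by_cases heq : pyIndent line = base
        · have hnA : ¬ (pyIndent line > base ∧ PySem.Str.pyGet? fw (-1) ≠ some ':') := by
            rw [heq]; intro hc; exact absurd hc.1 (lt_irrefl base)
          rw [if_neg hnA, if_neg (by rw [heq]; exact lt_irrefl base), if_pos heq]
          rw [← ih (num + 1) (res ++ flushPending base p) (some (num + off, [s]))
            (by intro ln parts hpe; cases hpe; simp) (by intro hc; cases hc)]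
          simp [flushPending, join_singleton_str, List.append_assoc]
        · have hgt : pyIndent line > base := by omega
          by_cases hm : mergesUp s = true
          · have hA : pyIndent line > base ∧ PySem.Str.pyGet? fw (-1) ≠ some ':' :=
              ⟨hgt, hcolon.mpr hm⟩
            rw [if_pos hA, if_neg heq, if_pos hm]
            cases p with
            | none =>
              have hres : res = [] := hn rfl
              subst hres
              simp only [flushPending, List.append_nil, List.getLast?_nil]
              exact ih (num + 1) [] none (by intro _ _ h; cases h) (fun _ => rfl)
            | some pr =>
              obtain ⟨ln, parts⟩ := pr
              have hpts : parts ≠ [] := hp ln parts rfl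
              simp only [flushPending, List.getLast?_concat, List.dropLast_concat]
              rw [← ih (num + 1) res (some (ln, parts ++ [s]))
                (by intro ln' parts' hpe; cases hpe; simp) (by intro hc; cases hc)]
              simp [flushPending, join_snoc parts s hpts]
          · have hnA : ¬ (pyIndent line > base ∧ PySem.Str.pyGet? fw (-1) ≠ some ':') := by
              intro hc; exact hm (hcolon.mp hc.2)
            rw [if_neg hnA, if_pos hgt, if_neg heq, if_neg (by simp [hm])]
            exact ih (num + 1) res p hp hn

-- ===== VERDICT (by name: the statement is the Claim_ definition above) =====
theorem lines_to_list_spec : Claim_equal_lines_to_list := by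
  intro lines start off stop _ _
  unfold Spec_lines_to_list lines_to_list lines_to_list_alt
  cases h : pySegment lines start stop with
  | nil => rfl
  | cons l0 rest =>
    simpa using loop_eq (pyIndent l0) off (l0 :: rest) 1 [] none (by simp) (by simp)
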